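-- pv_equiv track=rewrite | github.com/kartikeyagg/Algorithm-toolbox | week-2-8.py | fibono
-- ===== SOURCE A (Python) =====
-- def fibono(n):
--     a = [0,1]
--     if n<=1:
--         return n
--     for i in range(n):
--         a.append(a[-1]+a[-2])
--         a.pop(0)
--         '''temp = a[0]
--         a[0] = a[1]
--         a[1] = a[1] + temp'''
--     return ((a[1]*a[0])%10)
-- ===== SOURCE B (Python) =====
-- def fibono(n):
--     if n <= 1:
--         return n
--     # Fibonacci mod 10 is periodic with Pisano period 60
--     a, b = 0, 1
--     for _ in range(n % 60):
--         a, b = b, (a + b) % 10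
--     return (a * b) % 10
-- ===== Notes on version B (the rewrite author's own statement) =====
-- stated objective: faster
-- what changed: B reduces n modulo the Pisano period 60 and iterates a constant-size pair mod 10 (at most 60 steps) instead of A's O(n) loop over a growing big-integer list.
import Mathlib
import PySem

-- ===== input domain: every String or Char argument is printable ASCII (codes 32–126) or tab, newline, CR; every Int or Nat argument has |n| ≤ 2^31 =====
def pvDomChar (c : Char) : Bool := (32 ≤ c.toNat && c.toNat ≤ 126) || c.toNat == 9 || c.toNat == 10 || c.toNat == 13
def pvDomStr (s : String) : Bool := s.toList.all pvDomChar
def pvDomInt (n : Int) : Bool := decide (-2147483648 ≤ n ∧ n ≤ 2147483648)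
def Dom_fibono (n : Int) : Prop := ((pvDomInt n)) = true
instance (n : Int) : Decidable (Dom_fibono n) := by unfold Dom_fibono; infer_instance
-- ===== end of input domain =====

-- B replaces A's O(n) list-building loop by a constant-bounded (≤ 60 steps) pair iteration mod 10,
-- using that Fibonacci mod 10 has Pisano period 60 (objective: faster, asymptotic).

-- ===== PORT A =====
-- a.append(a[-1]+a[-2]); a.pop(0)  — the list always has ≥ 2 elements, so the .getD 0
-- defaults of the in-range pyGet? lookups are never taken.
def fibono (n : Int) : Int :=
  if n ≤ 1 then n
  else
    let a := (PySem.List.pyRange 0 n 1).foldl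
      (fun (a : List Int) _ =>
        (a ++ [(PySem.List.pyGet? a (-1)).getD 0 + (PySem.List.pyGet? a (-2)).getD 0]).drop 1)
      [0, 1]
    PySem.Int.mod ((PySem.List.pyGet? a 1).getD 0 * (PySem.List.pyGet? a 0).getD 0) 10

-- ===== PORT B =====
def fibono_alt (n : Int) : Int :=
  if n ≤ 1 then n
  else
    let p := (PySem.List.pyRange 0 (PySem.Int.mod n 60) 1).foldl
      (fun (p : Int × Int) _ => (p.2, PySem.Int.mod (p.1 + p.2) 10)) (0, 1)
    PySem.Int.mod (p.1 * p.2) 10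

-- ===== PRECONDITION & SPEC =====
def Spec_fibono (n : Int) (out : Int) : Prop := out = fibono_alt n
instance (n : Int) (out : Int) : Decidable (Spec_fibono n out) := by unfold Spec_fibono; infer_instance

-- ===== CLAIM (what is proved, stated in full; the proofs are below) =====
def Claim_equal_fibono : Prop := ∀ (n : Int), Dom_fibono n → Spec_fibono n (fibono n)

-- ===== LEMMAS AND PROOFS =====

-- a fold that ignores the list elements is an iterate of the step function
theorem foldl_const_iterate {α β : Type} (g : α → α) (l : List β) (s : α) :
    l.foldl (fun s _ => g s) s = g^[l.length] s := by
  induction l generalizing s with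
  | nil => rfl
  | cons x xs ih => simp [List.foldl_cons, ih, Function.iterate_succ_apply]

-- A's loop state after k steps
theorem stateA_iterate (k : Nat) :
    (fun (a : List Int) =>
        (a ++ [(PySem.List.pyGet? a (-1)).getD 0 + (PySem.List.pyGet? a (-2)).getD 0]).drop 1)^[k]
      [0, 1] = [(Nat.fib k : Int), (Nat.fib (k+1) : Int)] := by
  induction k with
  | zero => simp
  | succ k ih =>
    rw [Function.iterate_succ_apply', ih]
    simp [PySem.List.pyGet?, PySem.List.pyIdx?, Nat.fib_add_two]
    ring

-- B's loop state after k steps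
theorem stateB_iterate (k : Nat) :
    (fun (p : Int × Int) => (p.2, PySem.Int.mod (p.1 + p.2) 10))^[k] (0, 1)
      = (((Nat.fib k % 10 : Nat) : Int), ((Nat.fib (k+1) % 10 : Nat) : Int)) := by
  induction k with
  | zero => simp
  | succ k ih =>
    rw [Function.iterate_succ_apply', ih]
    simp only [Prod.mk.injEq]
    constructor
    · trivial
    · rw [PySem.Int.mod_eq_emod_of_pos (by norm_num)]
      rw [Nat.fib_add_two]
      push_cast
      omega

-- Pisano period 60 for the pair (fib k % 10, fib (k+1) % 10)
theorem fib_mod10_pair_shift (k : Nat) :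
    Nat.fib (k + 60) % 10 = Nat.fib k % 10 ∧
    Nat.fib (k + 60 + 1) % 10 = Nat.fib (k + 1) % 10 := by
  induction k with
  | zero => decide
  | succ k ih =>
    refine ⟨ih.2, ?_⟩
    have h1 : k + 1 + 60 + 1 = (k + 60) + 2 := by omega
    have h2 : k + 1 + 1 = k + 2 := by omega
    rw [h1, h2, Nat.fib_add_two (n := k+60), Nat.fib_add_two (n := k), Nat.add_mod, ih.1, ih.2, ← Nat.add_mod]

theorem fib_mod10_pair_mod (k : Nat) :
    Nat.fib (k % 60) % 10 = Nat.fib k % 10 ∧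
    Nat.fib (k % 60 + 1) % 10 = Nat.fib (k + 1) % 10 := by
  induction k using Nat.strong_induction_on with
  | _ k ih =>
    by_cases h : k < 60
    · rw [Nat.mod_eq_of_lt h]; exact ⟨rfl, rfl⟩
    · have hk : k = (k - 60) + 60 := by omega
      have := ih (k - 60) (by omega)
      have hs := fib_mod10_pair_shift (k - 60)
      constructor
      · rw [hk, Nat.add_mod_right, this.1, ← hs.1, ← hk]
      · rw [hk, Nat.add_mod_right, this.2, ← hs.2, ← hk]

theorem fibono_eq (n : Int) (h : ¬ n ≤ 1) : fibono n = fibono_alt n := by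
  have hn : 0 ≤ n := by omega
  unfold fibono fibono_alt
  rw [if_neg h, if_neg h]
  rw [foldl_const_iterate, foldl_const_iterate,
      PySem.List.length_pyRange_one, PySem.List.length_pyRange_one]
  rw [stateA_iterate, stateB_iterate]
  have hmod : (PySem.Int.mod n 60 - 0).toNat = (n - 0).toNat % 60 := by
    rw [PySem.Int.mod_eq_emod_of_pos (by norm_num)]
    omega
  rw [hmod]
  set k := (n - 0).toNat with hk
  have hA := fib_mod10_pair_mod k
  have h1 : ((Nat.fib (k % 60) : Int)) % 10 = ((Nat.fib k : Int)) % 10 := by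
    exact_mod_cast hA.1
  have h2 : ((Nat.fib (k % 60 + 1) : Int)) % 10 = ((Nat.fib (k + 1) : Int)) % 10 := by
    exact_mod_cast hA.2
  simp only [PySem.List.pyGet?, PySem.List.pyIdx?]
  norm_num [PySem.Int.mod_eq_emod_of_pos]
  rw [h1, h2, Int.mul_emod]
  conv_rhs => rw [Int.mul_emod]
  rw [mul_comm, Int.emod_emod_of_dvd _ (dvd_refl 10), Int.emod_emod_of_dvd _ (dvd_refl 10)]

-- ===== VERDICT (by name: the statement is the Claim_ definition above) =====
theorem fibono_spec : Claim_equal_fibono := by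
  intro n _
  unfold Spec_fibono
  by_cases h : n ≤ 1
  · unfold fibono fibono_alt
    rw [if_pos h, if_pos h]
  · exact fibono_eq n h
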